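-- pv_equiv track=rewrite | github.com/sirloinbh/JUNGLE_algorithm | 백준/Bronze/9506. 약수들의 합/약수들의 합.py | sum_of_div2
-- ===== SOURCE A (Python) =====
-- def sum_of_div2(n) :
--     result = "1"
--     if n == 1:
--         return result
--     else :
--         for i in range(2, n//2+2) :
--             if n%i == 0 :
--                 result+=" + "
--                 result+=str(i)
--         return result
-- ===== SOURCE B (Python) =====
-- def sum_of_div2(n):
--     # collect divisor pairs up to sqrt(n): small factors ascending, cofactors descending
--     small = [1]
--     large = []
--     i = 2
--     while i * i <= n:
--         if n % i == 0:
--             small.append(i)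
--             q = n // i
--             if q != i:
--                 large.append(q)
--         i += 1
--     return " + ".join(str(d) for d in small + large[::-1])
-- ===== Notes on version B (the rewrite author's own statement) =====
-- stated objective: faster
-- what changed: replaces the linear scan of 2..n//2+1 with a sqrt(n) loop collecting divisor pairs (small factor ascending, cofactor kept aside and reversed), then joins once
-- intended difference: For n=2 A's loop bound n//2+2 reaches n itself so A returns '1 + 2'; B returns '1', the proper-divisor sum string the task intends. — e.g. on sum_of_div2(2): A returns "1 + 2", B returns "1"
import Mathlib
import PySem

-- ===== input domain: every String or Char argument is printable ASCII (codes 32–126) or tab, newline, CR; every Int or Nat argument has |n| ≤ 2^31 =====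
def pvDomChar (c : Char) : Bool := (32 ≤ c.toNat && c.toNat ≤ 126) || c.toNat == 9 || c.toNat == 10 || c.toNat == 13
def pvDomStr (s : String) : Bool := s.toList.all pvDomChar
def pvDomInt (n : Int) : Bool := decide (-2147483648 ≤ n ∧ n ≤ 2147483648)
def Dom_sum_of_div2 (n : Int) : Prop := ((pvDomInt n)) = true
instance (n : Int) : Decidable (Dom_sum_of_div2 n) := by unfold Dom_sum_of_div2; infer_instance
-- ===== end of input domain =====

-- B replaces A's linear scan up to n//2+1 with a sqrt-bounded divisor-pair collection (objective: faster).

-- ===== PORT A =====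
def sum_of_div2 (n : Int) : String :=
  let result := "1"
  if n = 1 then result
  else
    (PySem.List.pyRange 2 (PySem.Int.floordiv n 2 + 2) 1).foldl
      (fun result i =>
        if PySem.Int.mod n i = 0 then result ++ " + " ++ PySem.Int.toStr i else result)
      result

-- ===== PORT B =====
-- B's 'while i * i <= n' loop; the fuel argument only counts the loop down (n.toNat + 1 iterations always suffice, see loop lemmas)
def sumDivLoop (n : Int) : Nat → Int → List Int → List Int → List Int × List Int
  | 0, _, small, large => (small, large)
  | fuel + 1, i, small, large =>
    if i * i ≤ n then
      if PySem.Int.mod n i = 0 then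
        let q := PySem.Int.floordiv n i
        sumDivLoop n fuel (i + 1) (small ++ [i]) (if q ≠ i then large ++ [q] else large)
      else sumDivLoop n fuel (i + 1) small large
    else (small, large)

def sum_of_div2_alt (n : Int) : String :=
  let p := sumDivLoop n (n.toNat + 1) 2 [1] []
  PySem.Str.join " + " ((p.1 ++ p.2.reverse).map PySem.Int.toStr)

-- ===== PRECONDITION & SPEC =====
-- For n = 2, A's loop bound n//2+2 reaches n itself so A returns "1 + 2"; B returns "1", the proper-divisor sum the task intends.
def D_sum_of_div2 (n : Int) : Prop := n = 2
instance (n : Int) : Decidable (D_sum_of_div2 n) := by unfold D_sum_of_div2; infer_instance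

def Spec_sum_of_div2 (n : Int) (out : String) : Prop := ¬ D_sum_of_div2 n → out = sum_of_div2_alt n
instance (n : Int) (out : String) : Decidable (Spec_sum_of_div2 n out) := by unfold Spec_sum_of_div2; infer_instance

def pvDiffWitness_sum_of_div2 : Int := 2
def pvDiffWitnessOut_sum_of_div2 : String × String := ("1 + 2", "1")

-- ===== CLAIM (what is proved, stated in full; the proofs are below) =====
def Claim_unchanged_sum_of_div2 : Prop := ∀ (n : Int), Dom_sum_of_div2 n → Spec_sum_of_div2 n (sum_of_div2 n)
def Claim_changed_sum_of_div2 : Prop := Dom_sum_of_div2 (pvDiffWitness_sum_of_div2) ∧ D_sum_of_div2 (pvDiffWitness_sum_of_div2) ∧ sum_of_div2 (pvDiffWitness_sum_of_div2) = pvDiffWitnessOut_sum_of_div2.1 ∧ sum_of_div2_alt (pvDiffWitness_sum_of_div2) = pvDiffWitnessOut_sum_of_div2.2 ∧ pvDiffWitnessOut_sum_of_div2.1 ≠ pvDiffWitnessOut_sum_of_div2.2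
def Claim_exact_sum_of_div2 : Prop := ∀ (n : Int), Dom_sum_of_div2 n → D_sum_of_div2 n → sum_of_div2 n ≠ sum_of_div2_alt n

-- ===== LEMMAS AND PROOFS =====

-- the divisor test of both loops, and B's "keep the cofactor too" test
def pvA (n j : Int) : Bool := decide (PySem.Int.mod n j = 0)
def pvB (n j : Int) : Bool := decide (PySem.Int.mod n j = 0 ∧ PySem.Int.floordiv n j ≠ j)

-- the characters of " + x1 + x2 + …"
def tailChars : List Int → List Char
  | [] => []
  | d :: t => ([' ', '+', ' '] ++ PySem.Int.toChars d) ++ tailChars t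

lemma sepChars : (" + " : String).toList = [' ', '+', ' '] := rfl

-- A's fold appends " + i" for each divisor i of the range
lemma foldA (n : Int) : ∀ (L : List Int) (s : String),
    (L.foldl
      (fun r i => if PySem.Int.mod n i = 0 then r ++ " + " ++ PySem.Int.toStr i else r)
      s).toList = s.toList ++ tailChars (L.filter (pvA n)) := by
  intro L
  induction L with
  | nil => intro s; simp [tailChars]
  | cons a t ih =>
    intro s
    by_cases h : PySem.Int.mod n a = 0
    · rw [List.foldl_cons, if_pos h, ih, List.filter_cons_of_pos (by simp [pvA, h])]
      simp [tailChars, sepChars, PySem.Int.toList_toStr, List.append_assoc]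
    · simp [List.foldl_cons, if_neg h, pvA, h, ih]

-- " + ".join over a nonempty list of rendered ints
lemma joinAux : ∀ (l : List Int) (d : Int),
    PySem.Chars.join [' ', '+', ' '] ((d :: l).map (fun i => PySem.Int.toChars i))
      = PySem.Int.toChars d ++ tailChars l := by
  intro l
  induction l with
  | nil => intro d; simp [PySem.Chars.join_singleton, tailChars]
  | cons a t ih =>
    intro d
    simp only [List.map_cons] at *
    rw [PySem.Chars.join_cons_cons, ih a]
    simp [tailChars, List.append_assoc]

-- stopping case of B's loop (any fuel)
lemma loop_stop (n : Int) (fuel : Nat) (i : Int) (s l : List Int) (h : ¬ i * i ≤ n) :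
    sumDivLoop n fuel i s l = (s, l) := by
  cases fuel <;> simp [sumDivLoop, h]

-- full characterisation of B's loop, given a bound r with  j*j ≤ n ↔ j ≤ r  (j ≥ 2)
lemma loop_spec (n r : Int)
    (hiff : ∀ j : Int, 2 ≤ j → (j * j ≤ n ↔ j ≤ r)) :
    ∀ (fuel : Nat) (i : Int), 2 ≤ i → (r + 1 - i).toNat < fuel → ∀ (s l : List Int),
    sumDivLoop n fuel i s l
      = (s ++ (PySem.List.pyRange i (r + 1) 1).filter (pvA n),
         l ++ ((PySem.List.pyRange i (r + 1) 1).filter (pvB n)).map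
                (fun j => PySem.Int.floordiv n j)) := by
  intro fuel
  induction fuel with
  | zero => intro i _ hf; omega
  | succ fuel ih =>
    intro i hi hf s l
    by_cases h : i * i ≤ n
    · have hir : i ≤ r := (hiff i hi).mp h
      have hrange : PySem.List.pyRange i (r + 1) 1 = i :: PySem.List.pyRange (i + 1) (r + 1) 1 :=
        PySem.List.pyRange_one_cons (by omega)
      by_cases hm : PySem.Int.mod n i = 0
      · by_cases hq : PySem.Int.floordiv n i ≠ i
        · simp only [sumDivLoop, if_pos h, if_pos hm, if_pos hq]
          rw [ih (i + 1) (by omega) (by omega)]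
          rw [hrange]
          simp [List.filter_cons, pvA, pvB, hm, hq, List.append_assoc]
        · simp only [sumDivLoop, if_pos h, if_pos hm, if_neg hq]
          rw [ih (i + 1) (by omega) (by omega)]
          rw [hrange]
          simp [List.filter_cons, pvA, pvB, hm, hq, List.append_assoc]
      · simp only [sumDivLoop, if_pos h, if_neg hm]
        rw [ih (i + 1) (by omega) (by omega)]
        rw [hrange]
        simp [List.filter_cons, pvA, pvB, hm]
    · have hri : r + 1 ≤ i := by
        by_contra hc
        exact h ((hiff i hi).mpr (by omega))
      rw [loop_stop n _ i s l h, PySem.List.pyRange_one_eq_nil (by omega)]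
      simp

-- an integer-sqrt bound exists for every n ≥ 0
lemma exists_bound (n : Int) (hn : 0 ≤ n) :
    ∃ r : Int, 0 ≤ r ∧ r * r ≤ n ∧ n < (r + 1) * (r + 1) := by
  refine ⟨(Nat.sqrt n.toNat : Int), by positivity, ?_, ?_⟩
  · have h : ((Nat.sqrt n.toNat * Nat.sqrt n.toNat : Nat) : Int) ≤ ((n.toNat : Nat) : Int) := by
      exact_mod_cast Nat.sqrt_le n.toNat
    push_cast at h
    omega
  · have h : ((n.toNat : Nat) : Int) < ((Nat.sqrt n.toNat + 1) * (Nat.sqrt n.toNat + 1) : Nat) := by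
      exact_mod_cast Nat.lt_succ_sqrt n.toNat
    push_cast at h
    omega

-- two strictly increasing integer lists with the same members are equal
lemma pairwise_lt_ext : ∀ {l₁ l₂ : List Int}, l₁.Pairwise (· < ·) → l₂.Pairwise (· < ·) →
    (∀ x, x ∈ l₁ ↔ x ∈ l₂) → l₁ = l₂ := by
  intro l₁
  induction l₁ with
  | nil =>
    intro l₂ _ _ hm
    cases l₂ with
    | nil => rfl
    | cons b t => exact absurd ((hm b).mpr (by simp)) (by simp)
  | cons a t ih =>
    intro l₂ h₁ h₂ hm
    cases l₂ with
    | nil => exact absurd ((hm a).mp (by simp)) (by simp)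
    | cons b t₂ =>
      have hab : a = b := by
        rcases List.mem_cons.mp ((hm a).mp (by simp)) with h | h
        · exact h
        · rcases List.mem_cons.mp ((hm b).mpr (by simp)) with h' | h'
          · exact h'.symm
          · have hba := (List.pairwise_cons.mp h₂).1 a h
            have hab := (List.pairwise_cons.mp h₁).1 b h'
            omega
      subst hab
      have htt : ∀ x, x ∈ t ↔ x ∈ t₂ := by
        intro x
        constructor
        · intro hx
          have hax : a < x := (List.pairwise_cons.mp h₁).1 x hx
          rcases List.mem_cons.mp ((hm x).mp (by simp [hx])) with h | h
          · omega
          · exact h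
        · intro hx
          have hax : a < x := (List.pairwise_cons.mp h₂).1 x hx
          rcases List.mem_cons.mp ((hm x).mpr (by simp [hx])) with h | h
          · omega
          · exact h
      rw [ih (List.pairwise_cons.mp h₁).2 (List.pairwise_cons.mp h₂).2 htt]

-- a divisor j ≤ r of n with cofactor ≠ j has cofactor > r
lemma cof_gt (n r j : Int) (hrl : r * r ≤ n) (hj : 2 ≤ j) (hjr : j ≤ r)
    (hdv : j ∣ n) (hne : n / j ≠ j) : r < n / j := by
  obtain ⟨c, hc⟩ := hdv
  have hj0 : j ≠ 0 := by omega
  have hcdiv : n / j = c := by rw [hc, Int.mul_ediv_cancel_left _ hj0]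
  rw [hcdiv]
  rw [hcdiv] at hne
  by_contra hcr
  push_neg at hcr
  have hjc : j ≤ c := by nlinarith
  have hjc' : j < c := lt_of_le_of_ne hjc (fun he => hne he.symm)
  nlinarith

-- cofactors are strictly antitone on divisors
lemma cof_lt (n : Int) (hn : 0 < n) {a b : Int} (ha : 2 ≤ a) (hab : a < b)
    (hda : a ∣ n) (hdb : b ∣ n) : n / b < n / a := by
  obtain ⟨ca, hca⟩ := hda
  obtain ⟨cb, hcb⟩ := hdb
  have hdiva : n / a = ca := by rw [hca, Int.mul_ediv_cancel_left _ (by omega : a ≠ 0)]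
  have hdivb : n / b = cb := by rw [hcb, Int.mul_ediv_cancel_left _ (by omega : b ≠ 0)]
  rw [hdiva, hdivb]
  have hcb0 : 0 < cb := by nlinarith
  nlinarith

-- the divisors of n in [2, n//2+1] are the small divisors [2, r] followed by their cofactors
lemma div_mem_char (n r x : Int) (hn : 4 ≤ n) (hr0 : 2 ≤ r)
    (hrl : r * r ≤ n) (hru : n < (r + 1) * (r + 1)) :
    (2 ≤ x ∧ x < n / 2 + 2 ∧ x ∣ n)
      ↔ ((2 ≤ x ∧ x < r + 1 ∧ x ∣ n) ∨
          ∃ j : Int, (2 ≤ j ∧ j < r + 1 ∧ j ∣ n ∧ n / j ≠ j) ∧ n / j = x) := by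
  constructor
  · rintro ⟨hx2, hxb, hdv⟩
    by_cases hxr : x ≤ r
    · exact Or.inl ⟨hx2, by omega, hdv⟩
    · push_neg at hxr
      obtain ⟨c, hc⟩ := hdv
      have hc1 : 1 ≤ c := by nlinarith
      have hcne1 : c ≠ 1 := by
        intro h1
        rw [h1, mul_one] at hc
        omega
      have hc2 : 2 ≤ c := by omega
      have hx1 : r + 1 ≤ x := by omega
      have hxx : n < x * x := by nlinarith
      have hcx : c < x := by nlinarith
      have hcr : c ≤ r := by
        by_contra hcc
        push_neg at hcc
        nlinarith
      have hncx : n = c * x := by rw [hc, mul_comm]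
      have hdivc : n / c = x := by
        rw [hncx, Int.mul_ediv_cancel_left _ (by omega : c ≠ 0)]
      exact Or.inr ⟨c, ⟨hc2, by omega, ⟨x, hncx⟩, by rw [hdivc]; omega⟩, hdivc⟩
  · rintro (⟨hx2, hxr, hdv⟩ | ⟨j, ⟨hj2, hjr, hdv, hne⟩, hx⟩)
    · have hrn2 : 2 * r ≤ n := by nlinarith
      exact ⟨hx2, by omega, hdv⟩
    · obtain ⟨c, hc⟩ := hdv
      have hcdiv : n / j = c := by rw [hc, Int.mul_ediv_cancel_left _ (by omega : j ≠ 0)]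
      rw [hcdiv] at hx hne
      subst hx
      have hjc : j ≤ c := by nlinarith
      have hjc' : j < c := lt_of_le_of_ne hjc (Ne.symm hne)
      have h2c : 2 * c ≤ n := by nlinarith
      exact ⟨by omega, by omega, ⟨j, by rw [hc]; ring⟩⟩

-- ===== VERDICT (by name: the statement is the Claim_ definition above) =====

-- unpacked membership in B's filtered ranges
lemma memA_facts (n r j : Int) (h : j ∈ (PySem.List.pyRange 2 (r + 1) 1).filter (pvA n)) :
    2 ≤ j ∧ j ≤ r ∧ j ∣ n := by
  rcases List.mem_filter.mp h with ⟨hm, hp⟩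
  rcases PySem.List.mem_pyRange_one.mp hm with ⟨h2, hlt⟩
  simp only [pvA, decide_eq_true_eq, PySem.Int.mod_eq_zero_iff_dvd] at hp
  exact ⟨h2, by omega, hp⟩

lemma memB_facts (n r j : Int) (h : j ∈ (PySem.List.pyRange 2 (r + 1) 1).filter (pvB n)) :
    2 ≤ j ∧ j ≤ r ∧ j ∣ n ∧ n / j ≠ j := by
  rcases List.mem_filter.mp h with ⟨hm, hp⟩
  rcases PySem.List.mem_pyRange_one.mp hm with ⟨h2, hlt⟩
  simp only [pvB, decide_eq_true_eq, PySem.Int.mod_eq_zero_iff_dvd,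
    PySem.Int.floordiv_eq_ediv_of_pos (by omega : (0:ℤ) < j)] at hp
  exact ⟨h2, by omega, hp.1, hp.2⟩

theorem sum_of_div2_spec : Claim_unchanged_sum_of_div2 := by
  intro n _ hnd
  have hnd2 : n ≠ 2 := hnd
  show sum_of_div2 n = sum_of_div2_alt n
  by_cases h1 : n ≤ 0
  · have hA : sum_of_div2 n = "1" := by
      simp only [sum_of_div2]
      rw [if_neg (by omega)]
      rw [PySem.List.pyRange_one_eq_nil (by
        rw [PySem.Int.floordiv_eq_ediv_of_pos (by norm_num : (0:ℤ) < 2)]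
        omega)]
      rfl
    have hB : sum_of_div2_alt n = "1" := by
      simp only [sum_of_div2_alt]
      rw [loop_stop n _ 2 [1] [] (by omega)]
      decide
    rw [hA, hB]
  · push_neg at h1
    by_cases h2 : n = 1
    · subst h2; decide
    by_cases h3 : n = 3
    · subst h3; decide
    have hn4 : 4 ≤ n := by omega
    obtain ⟨r, hr0, hrl, hru⟩ := exists_bound n (by omega)
    have hr2 : 2 ≤ r := by
      by_contra hr
      push_neg at hr
      interval_cases r <;> omega
    have hrn : r ≤ n := by nlinarith
    have hiff : ∀ j : Int, 2 ≤ j → (j * j ≤ n ↔ j ≤ r) := by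
      intro j hj
      constructor
      · intro hjj
        by_contra hc
        push_neg at hc
        have hx1 : r + 1 ≤ j := by omega
        have : (r + 1) * (r + 1) ≤ j * j := by nlinarith
        omega
      · intro hjr
        have : j * j ≤ r * r := by nlinarith
        omega
    have hfd2 : PySem.Int.floordiv n 2 = n / 2 :=
      PySem.Int.floordiv_eq_ediv_of_pos (by norm_num)
    have hloop := loop_spec n r hiff (n.toNat + 1) 2 (by omega) (by omega) [1] []
    have hcrux : (PySem.List.pyRange 2 (PySem.Int.floordiv n 2 + 2) 1).filter (pvA n)
        = (PySem.List.pyRange 2 (r + 1) 1).filter (pvA n)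
          ++ (((PySem.List.pyRange 2 (r + 1) 1).filter (pvB n)).map
               (fun j => PySem.Int.floordiv n j)).reverse := by
      apply pairwise_lt_ext
      · exact (PySem.List.pairwise_lt_pyRange_one _ _).filter _
      · rw [List.pairwise_append]
        refine ⟨(PySem.List.pairwise_lt_pyRange_one _ _).filter _, ?_, ?_⟩
        · rw [List.pairwise_reverse, List.pairwise_map]
          refine List.Pairwise.imp_of_mem ?_ ((PySem.List.pairwise_lt_pyRange_one _ _).filter _)
          intro a b ha hb hlt
          obtain ⟨ha2, har, hda, _⟩ := memB_facts n r a ha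
          obtain ⟨hb2, hbr, hdb, _⟩ := memB_facts n r b hb
          show PySem.Int.floordiv n b < PySem.Int.floordiv n a
          rw [PySem.Int.floordiv_eq_ediv_of_pos (by omega : (0:ℤ) < a),
              PySem.Int.floordiv_eq_ediv_of_pos (by omega : (0:ℤ) < b)]
          exact cof_lt n (by omega) ha2 hlt hda hdb
        · intro a ha b hb
          obtain ⟨ha2, har, _⟩ := memA_facts n r a ha
          rw [List.mem_reverse] at hb
          obtain ⟨j, hj, hjb⟩ := List.mem_map.mp hb
          obtain ⟨hj2, hjr, hjd, hjne⟩ := memB_facts n r j hj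
          rw [PySem.Int.floordiv_eq_ediv_of_pos (by omega : (0:ℤ) < j)] at hjb
          have := cof_gt n r j hrl hj2 hjr hjd hjne
          omega
      · intro x
        constructor
        · intro hx
          rcases List.mem_filter.mp hx with ⟨hmem, hp⟩
          rcases PySem.List.mem_pyRange_one.mp hmem with ⟨hx2, hxlt⟩
          rw [hfd2] at hxlt
          simp only [pvA, decide_eq_true_eq, PySem.Int.mod_eq_zero_iff_dvd] at hp
          rcases (div_mem_char n r x hn4 hr2 hrl hru).mp ⟨hx2, hxlt, hp⟩ with
            hL | ⟨j, ⟨hj2, hjr, hjd, hjne⟩, hjx⟩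
          · refine List.mem_append_left _ (List.mem_filter.mpr ⟨?_, ?_⟩)
            · exact PySem.List.mem_pyRange_one.mpr ⟨hL.1, hL.2.1⟩
            · simp [pvA, PySem.Int.mod_eq_zero_iff_dvd, hL.2.2]
          · refine List.mem_append_right _ ?_
            rw [List.mem_reverse]
            refine List.mem_map.mpr ⟨j, List.mem_filter.mpr ⟨?_, ?_⟩, ?_⟩
            · exact PySem.List.mem_pyRange_one.mpr ⟨hj2, hjr⟩
            · simp only [pvB, decide_eq_true_eq]
              rw [PySem.Int.mod_eq_zero_iff_dvd,
                  PySem.Int.floordiv_eq_ediv_of_pos (by omega : (0:ℤ) < j)]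
              exact ⟨hjd, hjne⟩
            · rw [PySem.Int.floordiv_eq_ediv_of_pos (by omega : (0:ℤ) < j)]
              exact hjx
        · intro hx
          have hmem : 2 ≤ x ∧ x < n / 2 + 2 ∧ x ∣ n := by
            rcases List.mem_append.mp hx with hL | hR
            · obtain ⟨hx2, hxr, hxd⟩ := memA_facts n r x hL
              exact (div_mem_char n r x hn4 hr2 hrl hru).mpr (Or.inl ⟨hx2, by omega, hxd⟩)
            · rw [List.mem_reverse] at hR
              obtain ⟨j, hj, hjx⟩ := List.mem_map.mp hR
              obtain ⟨hj2, hjr, hjd, hjne⟩ := memB_facts n r j hj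
              rw [PySem.Int.floordiv_eq_ediv_of_pos (by omega : (0:ℤ) < j)] at hjx
              exact (div_mem_char n r x hn4 hr2 hrl hru).mpr
                (Or.inr ⟨j, ⟨hj2, by omega, hjd, hjne⟩, hjx⟩)
          refine List.mem_filter.mpr ⟨?_, ?_⟩
          · exact PySem.List.mem_pyRange_one.mpr ⟨hmem.1, by rw [hfd2]; exact hmem.2.1⟩
          · simp [pvA, PySem.Int.mod_eq_zero_iff_dvd, hmem.2.2]
    apply String.toList_inj.mp
    have hAful : (sum_of_div2 n).toList
        = "1".toList
          ++ tailChars ((PySem.List.pyRange 2 (PySem.Int.floordiv n 2 + 2) 1).filter (pvA n)) := by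
      simp only [sum_of_div2]
      rw [if_neg (by omega)]
      exact foldA n _ _
    have hBful : (sum_of_div2_alt n).toList
        = "1".toList
          ++ tailChars ((PySem.List.pyRange 2 (r + 1) 1).filter (pvA n)
              ++ (((PySem.List.pyRange 2 (r + 1) 1).filter (pvB n)).map
                   (fun j => PySem.Int.floordiv n j)).reverse) := by
      simp only [sum_of_div2_alt, hloop]
      rw [PySem.Str.toList_join, List.map_map]
      have hmt : (String.toList ∘ PySem.Int.toStr) = fun i => PySem.Int.toChars i := by
        funext i
        exact PySem.Int.toList_toStr i
      rw [hmt, sepChars]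
      simp only [List.nil_append, List.cons_append]
      rw [joinAux]
      rfl
    rw [hAful, hBful, hcrux]

theorem sum_of_div2_changed : Claim_changed_sum_of_div2 := by
  unfold Claim_changed_sum_of_div2; decide

theorem sum_of_div2_tight : Claim_exact_sum_of_div2 := by
  intro n _ hd
  unfold D_sum_of_div2 at hd
  subst hd
  decide
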